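-- pv_equiv track=rewrite | github.com/MissCat-2025/reproduction | 1Tasks/step3/s1Thermal/s1GapConductance/step1_MeshGenerator_series.py | generate_parameter_combinations_aligned
-- ===== SOURCE A (Python) =====
-- import itertools
--
-- def aligned_length_and_broadcast(parameter_matrix):
--     """获取对齐长度，并支持将长度为1的列表广播为共同长度。
--     规则：
--     - 所有值必须为列表或元组；
--     - 取非单例列表的最大长度L；
--     - 长度为1的参数广播到L；
--     - 若存在两个及以上不同且>1的长度且不一致，则报错。
--     - 若全部为单值，则L=1。
--     返回：L 以及广播后的副本字典。
--     """
--     lengths = []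
--     for key, val in parameter_matrix.items():
--         if not isinstance(val, (list, tuple)):
--             raise ValueError(f"参数 '{key}' 的值必须是列表或元组")
--         lengths.append(len(val))
--
--     multi_lengths = sorted({l for l in lengths if l > 1})
--     if len(multi_lengths) > 1:
--         raise ValueError(f"存在不一致的参数序列长度：{multi_lengths}")
--
--     L = multi_lengths[0] if multi_lengths else 1
--     broadcasted = {}
--     for key, val in parameter_matrix.items():
--         if len(val) == 1:
--             broadcasted[key] = list(itertools.repeat(val[0], L))
--         elif len(val) == L:
--             broadcasted[key] = list(val)
--         else:
--             raise ValueError(f"参数 '{key}' 的长度为 {len(val)}，与对齐长度 {L} 不一致")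
--     return L, broadcasted
--
-- def generate_parameter_combinations_aligned(params_dict):
--     """按序列“对齐配对”生成参数组合，长度为共同长度（支持单值广播）。"""
--     L, broadcasted = aligned_length_and_broadcast(params_dict)
--     keys = list(broadcasted.keys())
--     combos = []
--     for i in range(L):
--         combo = {k: broadcasted[k][i] for k in keys}
--         combos.append(combo)
--     return combos
-- ===== SOURCE B (Python) =====
-- def generate_parameter_combinations_aligned(params_dict):
--     """按序列“对齐配对”生成参数组合，长度为共同长度（支持单值广播）。
--     单遍融合实现：不构造中间的广播表，逐 i 直接生成组合字典。"""
--     lengths = []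
--     for key, val in params_dict.items():
--         if not isinstance(val, (list, tuple)):
--             raise ValueError(f"参数 '{key}' 的值必须是列表或元组")
--         lengths.append(len(val))
--
--     multi_lengths = sorted({l for l in lengths if l > 1})
--     if len(multi_lengths) > 1:
--         raise ValueError(f"存在不一致的参数序列长度：{multi_lengths}")
--
--     L = multi_lengths[0] if multi_lengths else 1
--     combos = []
--     for i in range(L):
--         combo = {}
--         for key, val in params_dict.items():
--             if len(val) == 1:
--                 combo[key] = val[0]
--             elif len(val) == L:
--                 combo[key] = val[i]
--             else:
--                 raise ValueError(f"参数 '{key}' 的长度为 {len(val)}，与对齐长度 {L} 不一致")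
--         combos.append(combo)
--     return combos
-- ===== Notes on version B (the rewrite author's own statement) =====
-- stated objective: simpler
-- what changed: B fuses A's two passes (build a broadcasted copy of every parameter list, then index into that table per combo) into one loop that builds each combo dict directly from the original values, never constructing the intermediate broadcast table.
import Mathlib
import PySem

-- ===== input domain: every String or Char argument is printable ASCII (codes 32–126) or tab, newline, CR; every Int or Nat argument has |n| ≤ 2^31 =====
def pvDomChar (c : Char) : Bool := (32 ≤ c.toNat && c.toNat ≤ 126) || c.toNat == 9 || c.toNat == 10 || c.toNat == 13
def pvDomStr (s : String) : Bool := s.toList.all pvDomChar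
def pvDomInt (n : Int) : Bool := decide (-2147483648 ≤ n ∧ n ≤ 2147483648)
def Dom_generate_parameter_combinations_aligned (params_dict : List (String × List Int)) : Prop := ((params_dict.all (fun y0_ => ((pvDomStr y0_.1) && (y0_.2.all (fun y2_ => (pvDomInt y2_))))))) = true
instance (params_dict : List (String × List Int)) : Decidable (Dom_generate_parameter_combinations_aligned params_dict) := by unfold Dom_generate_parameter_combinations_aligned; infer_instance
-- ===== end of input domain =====

-- B fuses A's broadcast pass and its combo pass into one loop, never building the
-- intermediate broadcasted table; objective: simpler (one pass over the dict per combo).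


-- ===== PORT A =====
-- port of aligned_length_and_broadcast; `none` is exactly where the Python raises ValueError
-- (the isinstance check never fires: every value is a list by the argument's type)
def pvAlignedBroadcast (parameter_matrix : List (String × List Int)) :
    Option (Int × PySem.Dict String (List Int)) :=
  let lengths : List Int := parameter_matrix.map (fun kv => (kv.2.length : Int))
  let multi_lengths : List Int :=
    PySem.List.sorted (PySem.Set.ofList (lengths.filter (fun l => decide (1 < l)))) (fun x => x) false
  if 1 < multi_lengths.length then none
  else
    let L : Int := match multi_lengths with | [] => 1 | l :: _ => l
    let broadcasted : Option (PySem.Dict String (List Int)) :=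
      parameter_matrix.foldl (fun acc kv =>
        acc.bind (fun d =>
          if (kv.2.length : Int) = 1 then
            -- list(itertools.repeat(val[0], L)); the guard makes val nonempty, so headD never uses its default
            some (d.insert kv.1 (List.replicate L.toNat (kv.2.headD 0)))
          else if (kv.2.length : Int) = L then
            some (d.insert kv.1 kv.2)
          else none)) (some PySem.Dict.empty)
    broadcasted.map (fun d => (L, d))

def generate_parameter_combinations_aligned (params_dict : List (String × List Int)) : List (List (String × Int)) :=
  match pvAlignedBroadcast params_dict with
  | none => []   -- the Python raises ValueError here; these inputs are excluded by Pre_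
  | some (L, broadcasted) =>
    let keys := broadcasted.keys
    (PySem.List.pyRange 0 L).foldl (fun combos i =>
      combos ++ [(keys.foldl (fun (combo : PySem.Dict String Int) k =>
          -- broadcasted[k][i]: k is always a key of broadcasted and 0 ≤ i < L, so the defaults are unreachable
          combo.insert k ((PySem.List.pyGet? (broadcasted.getD k []) i).getD 0)) PySem.Dict.empty).items]) []

-- ===== PORT B =====
def generate_parameter_combinations_aligned_alt (params_dict : List (String × List Int)) : List (List (String × Int)) :=
  let lengths : List Int := params_dict.map (fun kv => (kv.2.length : Int))
  let multi_lengths : List Int :=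
    PySem.List.sorted (PySem.Set.ofList (lengths.filter (fun l => decide (1 < l)))) (fun x => x) false
  if 1 < multi_lengths.length then []   -- the Python raises ValueError here; excluded by Pre_
  else
    let L : Int := match multi_lengths with | [] => 1 | l :: _ => l
    ((PySem.List.pyRange 0 L).foldl (fun (acc : Option (List (List (String × Int)))) i =>
        acc.bind (fun combos =>
          (params_dict.foldl (fun (c : Option (PySem.Dict String Int)) kv =>
              c.bind (fun combo =>
                if (kv.2.length : Int) = 1 then some (combo.insert kv.1 (kv.2.headD 0))
                else if (kv.2.length : Int) = L then
                  some (combo.insert kv.1 ((PySem.List.pyGet? kv.2 i).getD 0))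
                else none)) (some PySem.Dict.empty)).map
            (fun combo => combos ++ [combo.items]))) (some [])).getD []

-- ===== PRECONDITION & SPEC =====
-- Pre_ excludes (a) inputs on which the Python raises ValueError (an empty value list, or two
-- inconsistent lengths > 1), and (b) duplicate keys, which cannot arise from a Python dict argument.
def Pre_generate_parameter_combinations_aligned (params_dict : List (String × List Int)) : Prop :=
  (∀ kv ∈ params_dict, 1 ≤ kv.2.length) ∧
  (∀ kv ∈ params_dict, ∀ kv' ∈ params_dict,
      1 < kv.2.length → 1 < kv'.2.length → kv.2.length = kv'.2.length) ∧
  (params_dict.map Prod.fst).Nodup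
instance (params_dict : List (String × List Int)) : Decidable (Pre_generate_parameter_combinations_aligned params_dict) := by unfold Pre_generate_parameter_combinations_aligned; infer_instance

def pvWitness_generate_parameter_combinations_aligned : (List (String × List Int)) :=
  [("a", [1, 2, 3]), ("b", [5]), ("c", [7, 8, 9])]

def Spec_generate_parameter_combinations_aligned (params_dict : List (String × List Int)) (out : List (List (String × Int))) : Prop := out = generate_parameter_combinations_aligned_alt params_dict
instance (params_dict : List (String × List Int)) (out : List (List (String × Int))) : Decidable (Spec_generate_parameter_combinations_aligned params_dict out) := by unfold Spec_generate_parameter_combinations_aligned; infer_instance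

-- ===== CLAIM (what is proved, stated in full; the proofs are below) =====
def Claim_equal_generate_parameter_combinations_aligned : Prop := ∀ (params_dict : List (String × List Int)), Dom_generate_parameter_combinations_aligned params_dict → Pre_generate_parameter_combinations_aligned params_dict → Spec_generate_parameter_combinations_aligned params_dict (generate_parameter_combinations_aligned params_dict)

-- ===== LEMMAS AND PROOFS =====

-- the multi_lengths list both ports compute, and the alignment length L
def pvMulti (pd : List (String × List Int)) : List Int :=
  PySem.List.sorted (PySem.Set.ofList ((pd.map (fun kv => (kv.2.length : Int))).filter (fun l => decide (1 < l)))) (fun x => x) false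
def pvL (pd : List (String × List Int)) : Int :=
  match pvMulti pd with | [] => 1 | l :: _ => l

-- the broadcast value of one parameter, and the value one combo assigns to it
def pvBVal (L : Int) (v : List Int) : List Int :=
  if (v.length : Int) = 1 then List.replicate L.toNat (v.headD 0) else v
def pvVal (i : Int) (v : List Int) : Int :=
  if (v.length : Int) = 1 then v.headD 0 else (PySem.List.pyGet? v i).getD 0

theorem pvMem_pvMulti_iff (pd : List (String × List Int)) (x : Int) :
    x ∈ pvMulti pd ↔ (∃ kv ∈ pd, (kv.2.length : Int) = x) ∧ 1 < x := by
  unfold pvMulti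
  rw [PySem.List.mem_sorted, PySem.Set.mem_ofList, List.mem_filter]
  simp [List.mem_map]

theorem pvMulti_len_le (pd : List (String × List Int)) (h : Pre_generate_parameter_combinations_aligned pd) : ¬ 1 < (pvMulti pd).length := by
  intro hlen
  have hnd : (pvMulti pd).Nodup := by
    unfold pvMulti
    exact ((PySem.List.sorted_perm _ _ _).nodup_iff).mpr (PySem.Set.nodup_ofList _)
  match hm : pvMulti pd, hlen with
  | a :: b :: t, _ =>
    have hab : a ≠ b := by
      rw [hm] at hnd; simp at hnd; tauto
    have ha : a ∈ pvMulti pd := by rw [hm]; simp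
    have hb : b ∈ pvMulti pd := by rw [hm]; simp
    rw [pvMem_pvMulti_iff] at ha hb
    obtain ⟨⟨kva, hkva, hla⟩, h1a⟩ := ha
    obtain ⟨⟨kvb, hkvb, hlb⟩, h1b⟩ := hb
    have := h.2.1 kva hkva kvb hkvb (by omega) (by omega)
    omega

theorem pvLen_cases (pd : List (String × List Int)) (h : Pre_generate_parameter_combinations_aligned pd) :
    ∀ kv ∈ pd, (kv.2.length : Int) = 1 ∨ (kv.2.length : Int) = pvL pd := by
  intro kv hkv
  by_cases hl : 1 < kv.2.length
  · right
    have hmem : (kv.2.length : Int) ∈ pvMulti pd := by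
      rw [pvMem_pvMulti_iff]; exact ⟨⟨kv, hkv, rfl⟩, by omega⟩
    unfold pvL
    cases hm : pvMulti pd with
    | nil => rw [hm] at hmem; simp at hmem
    | cons a t =>
      have ha : a ∈ pvMulti pd := by rw [hm]; simp
      rw [pvMem_pvMulti_iff] at ha
      obtain ⟨⟨kva, hkva, hla⟩, h1a⟩ := ha
      have := h.2.1 kv hkv kva hkva hl (by omega)
      show (kv.2.length : Int) = a; omega
  · left
    have := h.1 kv hkv
    omega

-- a fold of inserts of pairwise-fresh keys just appends the pairs (Option-wrapped step)
theorem pvOptInsertFold {ν : Type} (F : PySem.Dict String ν → (String × List Int) → Option (PySem.Dict String ν))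
    (val : (String × List Int) → ν) :
    ∀ (pd : List (String × List Int)) (d : PySem.Dict String ν),
      (pd.map Prod.fst).Nodup →
      (∀ kv ∈ pd, kv.1 ∉ d.items.map Prod.fst) →
      (∀ (d' : PySem.Dict String ν), ∀ kv ∈ pd, F d' kv = some (d'.insert kv.1 (val kv))) →
      pd.foldl (fun acc kv => acc.bind (fun d' => F d' kv)) (some d)
        = some ⟨d.items ++ pd.map (fun kv => (kv.1, val kv))⟩ := by
  intro pd
  induction pd with
  | nil => intro d _ _ _; simp
  | cons kv0 rest ih =>
    intro d hnd hfresh hF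
    have hc : d.contains kv0.1 = false := by
      rw [Bool.eq_false_iff]
      intro hcon
      simp only [PySem.Dict.contains, List.any_eq_true, beq_iff_eq] at hcon
      obtain ⟨p, hp, he⟩ := hcon
      exact hfresh kv0 (by simp) (List.mem_map.mpr ⟨p, hp, he⟩)
    have hstep : F d kv0 = some (d.insert kv0.1 (val kv0)) := hF d kv0 (by simp)
    have hins : (d.insert kv0.1 (val kv0)).items = d.items ++ [(kv0.1, val kv0)] := by
      simp [PySem.Dict.insert, hc]
    simp only [List.foldl_cons, Option.bind_some, hstep]
    have hrec := ih (d.insert kv0.1 (val kv0))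
      (by simpa using hnd.of_cons)
      (by
        intro kv hkv
        rw [hins]
        simp only [List.map_append, List.mem_append]
        push Not
        constructor
        · exact hfresh kv (by simp [hkv])
        · simp only [List.map_cons, List.nodup_cons] at hnd
          intro hmem
          simp at hmem
          exact hnd.1 (List.mem_map.mpr ⟨kv, hkv, hmem⟩))
      (fun d' kv hkv => hF d' kv (by simp [hkv]))
    rw [hrec, hins]
    simp

-- a fold of inserts over a nodup key list appends the pairs
theorem pvInsertFoldKeys {ν : Type} (val : String → ν) :
    ∀ (ks : List String) (d : PySem.Dict String ν),
      ks.Nodup → (∀ k ∈ ks, k ∉ d.items.map Prod.fst) →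
      (ks.foldl (fun c k => c.insert k (val k)) d).items = d.items ++ ks.map (fun k => (k, val k)) := by
  intro ks
  induction ks with
  | nil => intro d _ _; simp
  | cons k0 rest ih =>
    intro d hnd hfresh
    have hc : d.contains k0 = false := by
      rw [Bool.eq_false_iff]
      intro hcon
      simp only [PySem.Dict.contains, List.any_eq_true, beq_iff_eq] at hcon
      obtain ⟨p, hp, he⟩ := hcon
      exact hfresh k0 (by simp) (List.mem_map.mpr ⟨p, hp, he⟩)
    have hins : (d.insert k0 (val k0)).items = d.items ++ [(k0, val k0)] := by
      simp [PySem.Dict.insert, hc]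
    simp only [List.foldl_cons]
    rw [ih (d.insert k0 (val k0)) hnd.of_cons
      (by
        intro k hk
        rw [hins]
        simp only [List.map_append, List.mem_append]
        push Not
        refine ⟨hfresh k (by simp [hk]), ?_⟩
        simp only [List.nodup_cons] at hnd
        intro hmem
        simp at hmem
        exact hnd.1 (hmem ▸ hk)), hins]
    simp

-- looking the keys back up in the dict built from pd recovers pd's own entries
theorem pvKeysLookup {ν : Type} (f : List Int → ν) (g : ν → Int) (dflt : ν) :
    ∀ (pd : List (String × List Int)), (pd.map Prod.fst).Nodup →
      (pd.map Prod.fst).map (fun k => (k, g ((PySem.Dict.mk (pd.map (fun kv => (kv.1, f kv.2)))).getD k dflt)))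
        = pd.map (fun kv => (kv.1, g (f kv.2))) := by
  intro pd
  induction pd with
  | nil => intro _; simp
  | cons kv0 rest ih =>
    intro hnd
    simp only [List.map_cons, List.cons.injEq]
    constructor
    · simp [PySem.Dict.getD, PySem.Dict.get?_mk_cons]
    · have hstep : ∀ k ∈ rest.map Prod.fst,
          (PySem.Dict.mk ((kv0.1, f kv0.2) :: rest.map (fun kv => (kv.1, f kv.2)))).getD k dflt
            = (PySem.Dict.mk (rest.map (fun kv => (kv.1, f kv.2)))).getD k dflt := by
        intro k hk
        have hne : kv0.1 ≠ k := by
          simp only [List.map_cons, List.nodup_cons] at hnd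
          intro he
          exact hnd.1 (he ▸ hk)
        simp [PySem.Dict.getD, PySem.Dict.get?_mk_cons, hne]
      rw [List.map_congr_left (fun k hk => by rw [hstep k hk])]
      exact ih (by simp only [List.map_cons, List.nodup_cons] at hnd; exact hnd.2)

theorem pvBVal_get (L i : Int) (v : List Int) (hi0 : 0 ≤ i) (hiL : i < L)
    (_hv : (v.length : Int) = 1 ∨ (v.length : Int) = L) :
    (PySem.List.pyGet? (pvBVal L v) i).getD 0 = pvVal i v := by
  unfold pvBVal pvVal
  by_cases h1 : (v.length : Int) = 1
  · simp only [h1, if_true]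
    have : i = ((i.toNat : Nat) : Int) := (Int.toNat_of_nonneg hi0).symm
    rw [this, PySem.List.pyGet?_natCast]
    have hlt : i.toNat < L.toNat := by omega
    rw [List.getElem?_eq_getElem (by simpa using hlt)]
    simp
  · simp [h1]

theorem pvBroadcast_eq (pd : List (String × List Int))
    (h : Pre_generate_parameter_combinations_aligned pd) :
    pvAlignedBroadcast pd = some (pvL pd, ⟨pd.map (fun kv => (kv.1, pvBVal (pvL pd) kv.2))⟩) := by
  have h0 : pvAlignedBroadcast pd =
      if 1 < (pvMulti pd).length then none
      else (pd.foldl (fun acc kv =>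
        acc.bind (fun d =>
          if (kv.2.length : Int) = 1 then
            some (d.insert kv.1 (List.replicate (pvL pd).toNat (kv.2.headD 0)))
          else if (kv.2.length : Int) = pvL pd then
            some (d.insert kv.1 kv.2)
          else none)) (some PySem.Dict.empty)).map (fun d => (pvL pd, d)) := rfl
  rw [h0, if_neg (pvMulti_len_le pd h)]
  rw [pvOptInsertFold
      (fun d' kv =>
        if (kv.2.length : Int) = 1 then
          some (d'.insert kv.1 (List.replicate (pvL pd).toNat (kv.2.headD 0)))
        else if (kv.2.length : Int) = pvL pd then
          some (d'.insert kv.1 kv.2)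
        else none)
      (fun kv => pvBVal (pvL pd) kv.2) pd PySem.Dict.empty h.2.2 (by simp [PySem.Dict.empty])
      ?_]
  · simp [PySem.Dict.empty]
  · intro d' kv hkv
    rcases pvLen_cases pd h kv hkv with h1 | hL
    · simp [h1, pvBVal]
    · by_cases h1 : (kv.2.length : Int) = 1
      · simp [h1, pvBVal]
      · simp only []
        rw [if_neg h1, if_pos hL]
        simp only [pvBVal]
        rw [if_neg h1]

theorem pvPortA_eq (pd : List (String × List Int))
    (h : Pre_generate_parameter_combinations_aligned pd) :
    generate_parameter_combinations_aligned pd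
      = (PySem.List.pyRange 0 (pvL pd)).map (fun i => pd.map (fun kv => (kv.1, pvVal i kv.2))) := by
  unfold generate_parameter_combinations_aligned
  rw [pvBroadcast_eq pd h]
  simp only []
  rw [PySem.List.foldl_congr_mem _ _
    (fun combos i => combos ++ [pd.map (fun kv => (kv.1, pvVal i kv.2))]) []
    ?_]
  · rw [PySem.List.foldl_append_singleton_eq_map]
    simp
  · intro combos i hi
    congr 1
    have hkeys : (PySem.Dict.mk (pd.map (fun kv => (kv.1, pvBVal (pvL pd) kv.2)))).keys
        = pd.map Prod.fst := by
      simp [PySem.Dict.keys]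
    rw [hkeys]
    rw [pvInsertFoldKeys
      (fun k => ((PySem.List.pyGet? ((PySem.Dict.mk (pd.map (fun kv => (kv.1, pvBVal (pvL pd) kv.2)))).getD k []) i).getD 0))
      (pd.map Prod.fst) PySem.Dict.empty h.2.2 (by simp [PySem.Dict.empty])]
    have hlk := pvKeysLookup (fun v => pvBVal (pvL pd) v)
      (fun x => (PySem.List.pyGet? x i).getD 0) [] pd h.2.2
    simp only [] at hlk ⊢
    rw [show (PySem.Dict.empty : PySem.Dict String Int).items = [] from rfl, List.nil_append]
    rw [hlk]
    congr 1
    refine List.map_congr_left ?_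
    intro kv hkv
    have hi' := (PySem.List.mem_pyRange_one).mp hi
    rw [pvBVal_get (pvL pd) i kv.2 hi'.1 hi'.2 (pvLen_cases pd h kv hkv)]

theorem pvOptOuterFold (G : Int → Option (PySem.Dict String Int)) (c : Int → List (String × Int)) :
    ∀ (l : List Int) (combos : List (List (String × Int))),
      (∀ i ∈ l, G i = some ⟨c i⟩) →
      l.foldl (fun acc i => acc.bind (fun cs => (G i).map (fun combo => cs ++ [combo.items]))) (some combos)
        = some (combos ++ l.map c) := by
  intro l
  induction l with
  | nil => intro combos _; simp
  | cons i0 rest ih =>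
    intro combos hG
    simp only [List.foldl_cons, Option.bind_some]
    rw [hG i0 (by simp)]
    simp only [Option.map_some]
    rw [ih (combos ++ [(PySem.Dict.mk (c i0)).items]) (fun i hi => hG i (by simp [hi]))]
    simp

theorem pvPortB_eq (pd : List (String × List Int))
    (h : Pre_generate_parameter_combinations_aligned pd) :
    generate_parameter_combinations_aligned_alt pd
      = (PySem.List.pyRange 0 (pvL pd)).map (fun i => pd.map (fun kv => (kv.1, pvVal i kv.2))) := by
  have h0 : generate_parameter_combinations_aligned_alt pd =
      (if 1 < (pvMulti pd).length then []
       else ((PySem.List.pyRange 0 (pvL pd)).foldl (fun (acc : Option (List (List (String × Int)))) i =>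
          acc.bind (fun combos =>
            (pd.foldl (fun (c : Option (PySem.Dict String Int)) kv =>
                c.bind (fun combo =>
                  if (kv.2.length : Int) = 1 then some (combo.insert kv.1 (kv.2.headD 0))
                  else if (kv.2.length : Int) = pvL pd then
                    some (combo.insert kv.1 ((PySem.List.pyGet? kv.2 i).getD 0))
                  else none)) (some PySem.Dict.empty)).map
              (fun combo => combos ++ [combo.items]))) (some [])).getD []) := rfl
  rw [h0, if_neg (pvMulti_len_le pd h)]
  rw [pvOptOuterFold
      (fun i => pd.foldl (fun (c : Option (PySem.Dict String Int)) kv =>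
          c.bind (fun combo =>
            if (kv.2.length : Int) = 1 then some (combo.insert kv.1 (kv.2.headD 0))
            else if (kv.2.length : Int) = pvL pd then
              some (combo.insert kv.1 ((PySem.List.pyGet? kv.2 i).getD 0))
            else none)) (some PySem.Dict.empty))
      (fun i => pd.map (fun kv => (kv.1, pvVal i kv.2)))
      (PySem.List.pyRange 0 (pvL pd)) [] ?_]
  · simp
  · intro i hi
    simp only []
    rw [pvOptInsertFold
        (fun combo kv =>
          if (kv.2.length : Int) = 1 then some (combo.insert kv.1 (kv.2.headD 0))
          else if (kv.2.length : Int) = pvL pd then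
            some (combo.insert kv.1 ((PySem.List.pyGet? kv.2 i).getD 0))
          else none)
        (fun kv => pvVal i kv.2) pd PySem.Dict.empty h.2.2 (by simp [PySem.Dict.empty]) ?_]
    · rw [show (PySem.Dict.empty : PySem.Dict String Int).items = [] from rfl, List.nil_append]
    · intro d' kv hkv
      rcases pvLen_cases pd h kv hkv with h1 | hL
      · simp only []
        rw [if_pos h1]
        simp [pvVal, h1]
      · by_cases h1 : (kv.2.length : Int) = 1
        · simp only []
          rw [if_pos h1]
          simp [pvVal, h1]
        · simp only []
          rw [if_neg h1, if_pos hL]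
          simp only [pvVal]
          rw [if_neg h1]

-- ===== VERDICT (by name: the statement is the Claim_ definition above) =====
theorem generate_parameter_combinations_aligned_spec : Claim_equal_generate_parameter_combinations_aligned := by
  intro pd _ hpre
  unfold Spec_generate_parameter_combinations_aligned
  rw [pvPortA_eq pd hpre, pvPortB_eq pd hpre]
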